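-- pv_equiv track=rewrite | github.com/denson/hypergraph_code_explorer | src/hypergraph_code_explorer/retrieval/dispatch.py | _is_test_path
-- ===== SOURCE A (Python) =====
-- def _is_test_path(path: str) -> bool:
--     """Detect whether a file path is a test file.
--
--     Matches common Python project conventions:
--       - Files under a 'tests/' or 'test/' directory
--       - Files named test_*.py or *_test.py
--       - conftest.py files
--       - Files under directories like 'testing/', 'test_*/'
--
--     Works on both individual file paths and collapsed directory paths
--     (ending with '/').
--     """
--     # Normalize to forward slashes
--     normalized = path.replace("\\", "/").lower()
--
--     # Split into path segments
--     parts = normalized.rstrip("/").split("/")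
--
--     for part in parts:
--         # Directory named 'tests' or 'test'
--         if part in ("tests", "test"):
--             return True
--         # Directory starting with 'test_' (e.g. test_migrations_plan/)
--         if part.startswith("test_"):
--             return True
--
--     # Filename checks (only for non-directory paths)
--     if not path.endswith("/") and parts:
--         filename = parts[-1]
--         if filename.startswith("test_") or filename.endswith("_test.py"):
--             return True
--         if filename in ("conftest.py", "testing.py"):
--             return True
--
--     return False
-- ===== SOURCE B (Python) =====
-- def _is_test_path(path: str) -> bool:
--     """Detect whether a file path is a test file (substring-matching rewrite)."""
--     s = path.replace("\\", "/").lower().rstrip("/")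
--     # Directory/segment checks: a segment equal to 'tests'/'test' or starting
--     # with 'test_' shows up as a slash-delimited substring of "/" + s + "/".
--     t = "/" + s + "/"
--     if "/tests/" in t or "/test/" in t or "/test_" in t:
--         return True
--     # Filename checks (the 'test_*' filename case is already covered above).
--     if not path.endswith("/"):
--         u = "/" + s
--         if s.endswith("_test.py") or u.endswith("/conftest.py") or u.endswith("/testing.py"):
--             return True
--     return False
-- ===== Notes on version B (the rewrite author's own statement) =====
-- stated objective: idiomatic
-- what changed: Replaces the explicit split-into-segments loop and per-segment startswith/equality tests by three slash-delimited substring searches on the normalized path plus three suffix checks, with no segment list built at all.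
import Mathlib
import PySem

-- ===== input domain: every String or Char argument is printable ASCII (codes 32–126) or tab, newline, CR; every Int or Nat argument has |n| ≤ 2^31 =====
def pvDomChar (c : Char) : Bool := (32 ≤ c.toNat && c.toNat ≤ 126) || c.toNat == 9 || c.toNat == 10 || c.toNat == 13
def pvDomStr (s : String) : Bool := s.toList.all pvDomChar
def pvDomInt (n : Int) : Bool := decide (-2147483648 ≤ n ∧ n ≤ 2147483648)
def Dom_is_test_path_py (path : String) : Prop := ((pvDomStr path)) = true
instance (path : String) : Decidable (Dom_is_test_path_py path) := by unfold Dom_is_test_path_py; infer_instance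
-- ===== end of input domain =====

-- B replaces A's split-into-segments loop by slash-delimited substring searches on the
-- normalized path (plus suffix checks for the filename cases); proved equal on all inputs.


-- ===== PORT A =====
-- hand port of Python's s.rstrip("/") (drop all trailing '/' characters); exact
def pyRstripSlash (cs : List Char) : List Char :=
  (cs.reverse.dropWhile (· == '/')).reverse

-- the 'for part in parts: … return True' loop of A, with its early returns
def pyLoopA : List (List Char) → Bool
  | [] => false
  | part :: rest =>
    if part == "tests".toList || part == "test".toList then true
    else if PySem.Chars.startswith part "test_".toList then true
    else pyLoopA rest

def is_test_path_py (path : String) : Bool :=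
  let normalized := PySem.Chars.lower (PySem.Chars.replace path.toList ['\\'] ['/'])
  let parts := PySem.Chars.splitOn (pyRstripSlash normalized) ['/']
  if pyLoopA parts then true
  else if (!PySem.Chars.endswith path.toList ['/']) && (!parts.isEmpty) then
    -- parts[-1]: parts is nonempty here, so the lookup succeeds
    let filename := (PySem.List.pyGet? parts (-1)).getD []
    if PySem.Chars.startswith filename "test_".toList
        || PySem.Chars.endswith filename "_test.py".toList then true
    else if filename == "conftest.py".toList || filename == "testing.py".toList then true
    else false
  else false

-- ===== PORT B =====
def is_test_path_py_alt (path : String) : Bool :=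
  let s := pyRstripSlash (PySem.Chars.lower (PySem.Chars.replace path.toList ['\\'] ['/']))
  let t := '/' :: (s ++ ['/'])
  if PySem.Chars.isIn "/tests/".toList t || PySem.Chars.isIn "/test/".toList t
      || PySem.Chars.isIn "/test_".toList t then true
  else if !PySem.Chars.endswith path.toList ['/'] then
    let u := '/' :: s
    PySem.Chars.endswith s "_test.py".toList
      || PySem.Chars.endswith u "/conftest.py".toList
      || PySem.Chars.endswith u "/testing.py".toList
  else false

-- ===== PRECONDITION & SPEC =====
def Spec_is_test_path_py (path : String) (out : Bool) : Prop := out = is_test_path_py_alt path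
instance (path : String) (out : Bool) : Decidable (Spec_is_test_path_py path out) := by unfold Spec_is_test_path_py; infer_instance

-- ===== CLAIM (what is proved, stated in full; the proofs are below) =====
def Claim_equal_is_test_path_py : Prop := ∀ (path : String), Dom_is_test_path_py path → Spec_is_test_path_py path (is_test_path_py path)

-- ===== LEMMAS AND PROOFS =====

-- proof-side model of Python's str.split("/") on char lists (accumulator = current segment)
def splitAux (cur : List Char) : List Char → List (List Char)
  | [] => [cur]
  | c :: rest => if c = '/' then cur :: splitAux [] rest else splitAux (cur ++ [c]) rest

theorem splitAux_ne_nil (cur : List Char) (s : List Char) : splitAux cur s ≠ [] := by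
  induction s generalizing cur with
  | nil => simp [splitAux]
  | cons c r ih =>
    simp only [splitAux]
    split
    · simp
    · exact ih _

theorem go_eq (fuel : Nat) (l cur : List Char) (acc : List (List Char)) (h : l.length ≤ fuel) :
    PySem.Chars.splitOn.go ['/'] fuel l cur acc = acc.reverse ++ splitAux cur.reverse l := by
  induction fuel generalizing l cur acc with
  | zero =>
    cases l with
    | nil => simp [PySem.Chars.splitOn.go, splitAux]
    | cons c r => simp at h
  | succ n ih =>
    cases l with
    | nil => simp [PySem.Chars.splitOn.go, splitAux]
    | cons c r =>
      rw [PySem.Chars.splitOn.go]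
      by_cases hc : c = '/'
      · subst hc
        simp only [List.isPrefixOf, BEq.rfl, Bool.and_self, if_pos]
        rw [ih _ _ _ (by simpa using Nat.le_of_succ_le_succ h)]
        simp [splitAux]
      · rw [if_neg (by simp [List.isPrefixOf]; intro h'; exact absurd h'.symm hc)]
        rw [ih _ _ _ (by simpa using Nat.le_of_succ_le_succ h)]
        simp [splitAux, hc]

theorem splitOn_eq (s : List Char) : PySem.Chars.splitOn s ['/'] = splitAux [] s := by
  rw [PySem.Chars.splitOn, go_eq _ _ _ _ (by omega)]
  simp

-- first slash aligns: a ++ '/'::u prefix of c ++ '/'::w with slash-free a, c forces a = c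
theorem helper1 (a : List Char) (u : List Char) (c w : List Char)
    (ha : '/' ∉ a) (hc : '/' ∉ c) :
    (a ++ '/' :: u <+: c ++ '/' :: w) ↔ a = c ∧ u <+: w := by
  induction a generalizing c with
  | nil =>
    cases c with
    | nil => simp
    | cons c0 c' =>
      simp only [List.nil_append, List.cons_append, List.cons_prefix_cons]
      have : c0 ≠ '/' := fun h => hc (h ▸ List.mem_cons_self)
      simp [this.symm]
  | cons a0 a' iha =>
    have ha0 : a0 ≠ '/' := fun h => ha (h ▸ List.mem_cons_self)
    cases c with
    | nil =>
      simp only [List.cons_append, List.nil_append, List.cons_prefix_cons]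
      simp [ha0]
    | cons c0 c' =>
      simp only [List.cons_append, List.cons_prefix_cons]
      rw [iha c' (fun h => ha (List.mem_cons_of_mem _ h)) (fun h => hc (List.mem_cons_of_mem _ h))]
      constructor
      · rintro ⟨h1, h2, h3⟩; exact ⟨by rw [h1, h2], h3⟩
      · rintro ⟨h1, h3⟩; injection h1 with h1a h1b; exact ⟨h1a, h1b, h3⟩

-- a slash-free prefix cannot reach past a slash
theorem pref_noslash (y : List Char) (cur w : List Char) (hy : '/' ∉ y) :
    (y <+: cur ++ '/' :: w) ↔ y <+: cur := by
  induction y generalizing cur with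
  | nil => simp
  | cons y0 y' ihy =>
    have hy0 : y0 ≠ '/' := fun h => hy (h ▸ List.mem_cons_self)
    cases cur with
    | nil =>
      simp only [List.nil_append, List.cons_prefix_cons]
      simp [hy0]
    | cons b cur' =>
      simp only [List.cons_append, List.cons_prefix_cons]
      rw [ihy cur' (fun h => hy (List.mem_cons_of_mem _ h))]

-- a pattern starting with '/' cannot start inside a slash-free block
theorem infix_skip (cur : List Char) (q w : List Char) (hc : '/' ∉ cur) :
    ('/' :: q <:+: cur ++ w) ↔ '/' :: q <:+: w := by
  induction cur with
  | nil => simp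
  | cons a cur' ih =>
    have ha : a ≠ '/' := fun h => hc (h ▸ List.mem_cons_self)
    rw [List.cons_append, List.infix_cons_iff, ih (fun h => hc (List.mem_cons_of_mem _ h))]
    simp only [List.cons_prefix_cons]
    constructor
    · rintro (⟨h1, -⟩ | h2)
      · exact absurd h1.symm ha
      · exact h2
    · exact Or.inr

-- segment membership = slash-delimited infix
theorem seg_iff (s : List Char) (cur x : List Char) (hc : '/' ∉ cur) (hx : '/' ∉ x) :
    ('/' :: (x ++ ['/']) <:+: '/' :: (cur ++ s ++ ['/'])) ↔ x ∈ splitAux cur s := by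
  induction s generalizing cur with
  | nil =>
    simp only [List.append_nil, splitAux, List.mem_singleton]
    rw [List.infix_cons_iff]
    constructor
    · rintro (hp | hi)
      · rw [List.cons_prefix_cons] at hp
        have h2 : x ++ '/' :: ([] : List Char) <+: cur ++ '/' :: ([] : List Char) := by
          simpa using hp.2
        exact ((helper1 x [] cur [] hx hc).mp h2).1
      · exfalso
        have h3 : '/' :: (x ++ ['/']) <:+: cur ++ ('/' :: ([] : List Char)) := by simpa using hi
        have h4 := (infix_skip cur _ _ hc).mp h3
        have hlen := h4.length_le
        simp at hlen
    · rintro rfl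
      exact Or.inl (List.prefix_refl _)
  | cons c r ih =>
    by_cases hcc : c = '/'
    · subst hcc
      rw [show splitAux cur ('/' :: r) = cur :: splitAux [] r from by simp [splitAux]]
      rw [List.mem_cons, List.infix_cons_iff]
      have harr : cur ++ '/' :: r ++ ['/'] = cur ++ '/' :: (r ++ ['/']) := by simp
      constructor
      · rintro (hp | hi)
        · left
          rw [List.cons_prefix_cons] at hp
          have h2 : x ++ '/' :: ([] : List Char) <+: cur ++ '/' :: (r ++ ['/']) := by
            have := hp.2; rw [harr] at this; simpa using this
          exact ((helper1 x [] cur (r ++ ['/']) hx hc).mp h2).1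
        · right
          rw [harr] at hi
          have h3 := (infix_skip cur _ _ hc).mp hi
          exact (ih [] (by simp)).mp (by simpa using h3)
      · rintro (rfl | hmem)
        · left
          rw [List.cons_prefix_cons]
          exact ⟨rfl, by rw [harr]; simp⟩
        · have h4 : '/' :: (x ++ ['/']) <:+: '/' :: (r ++ ['/']) := by
            have := (ih [] (by simp)).mpr (by simpa using hmem)
            simpa using this
          refine Or.inr (h4.trans ?_)
          have hsuf : '/' :: (r ++ ['/']) <:+ cur ++ '/' :: r ++ ['/'] := ⟨cur, by simp⟩
          exact hsuf.isInfix
    · rw [(by simp [splitAux, hcc] : splitAux cur (c :: r) = splitAux (cur ++ [c]) r)]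
      have harr : cur ++ (c :: r) ++ ['/'] = (cur ++ [c]) ++ r ++ ['/'] := by simp
      rw [harr]
      exact ih (cur ++ [c]) (by
        intro hm
        rcases List.mem_append.mp hm with hm | hm
        · exact hc hm
        · exact hcc (List.mem_singleton.mp hm).symm)

-- segment-prefix = '/'-anchored infix
theorem segpre_iff (s : List Char) (cur y : List Char) (hc : '/' ∉ cur) (hy : '/' ∉ y) :
    ('/' :: y <:+: '/' :: (cur ++ s ++ ['/'])) ↔ ∃ p ∈ splitAux cur s, y <+: p := by
  induction s generalizing cur with
  | nil =>
    simp only [List.append_nil, splitAux, List.mem_singleton, exists_eq_left]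
    rw [List.infix_cons_iff]
    constructor
    · rintro (hp | hi)
      · rw [List.cons_prefix_cons] at hp
        have h2 : y <+: cur ++ '/' :: ([] : List Char) := by simpa using hp.2
        exact (pref_noslash y cur [] hy).mp h2
      · have h3 : '/' :: y <:+: cur ++ ('/' :: ([] : List Char)) := by simpa using hi
        have h4 := (infix_skip cur _ _ hc).mp h3
        have hlen := h4.length_le
        have : y = [] := by
          cases y with
          | nil => rfl
          | cons a t => simp at hlen
        exact this ▸ List.nil_prefix
    · intro hp
      refine Or.inl ?_
      rw [List.cons_prefix_cons]
      exact ⟨rfl, hp.trans (List.prefix_append cur ['/'])⟩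
  | cons c r ih =>
    by_cases hcc : c = '/'
    · subst hcc
      rw [(by simp [splitAux] : splitAux cur ('/' :: r) = cur :: splitAux [] r)]
      rw [List.infix_cons_iff]
      have harr : cur ++ '/' :: r ++ ['/'] = cur ++ '/' :: (r ++ ['/']) := by simp
      constructor
      · rintro (hp | hi)
        · rw [List.cons_prefix_cons] at hp
          have h2 : y <+: cur ++ '/' :: (r ++ ['/']) := by
            have := hp.2; rw [harr] at this; exact this
          exact ⟨cur, List.mem_cons_self, (pref_noslash y cur _ hy).mp h2⟩
        · rw [harr] at hi
          have h3 := (infix_skip cur _ _ hc).mp hi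
          obtain ⟨p, hp1, hp2⟩ := (ih [] (by simp)).mp (by simpa using h3)
          exact ⟨p, List.mem_cons_of_mem _ hp1, hp2⟩
      · rintro ⟨p, hp1, hp2⟩
        rcases List.mem_cons.mp hp1 with rfl | hmem
        · refine Or.inl ?_
          rw [List.cons_prefix_cons]
          refine ⟨rfl, ?_⟩
          rw [harr]
          exact hp2.trans (List.prefix_append p ('/' :: (r ++ ['/'])))
        · have h4 : '/' :: y <:+: '/' :: (r ++ ['/']) := by
            have := (ih [] (by simp)).mpr ⟨p, hmem, hp2⟩
            simpa using this
          refine Or.inr (h4.trans ?_)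
          have hsuf : '/' :: (r ++ ['/']) <:+ cur ++ '/' :: r ++ ['/'] := ⟨cur, by simp⟩
          exact hsuf.isInfix
    · rw [(by simp [splitAux, hcc] : splitAux cur (c :: r) = splitAux (cur ++ [c]) r)]
      have harr : cur ++ (c :: r) ++ ['/'] = (cur ++ [c]) ++ r ++ ['/'] := by simp
      rw [harr]
      exact ih (cur ++ [c]) (by
        intro hm
        rcases List.mem_append.mp hm with hm | hm
        · exact hc hm
        · exact hcc (List.mem_singleton.mp hm).symm)

theorem loopA_iff (parts : List (List Char)) :
    pyLoopA parts = true ↔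
      ∃ p ∈ parts, p = "tests".toList ∨ p = "test".toList ∨ "test_".toList <+: p := by
  induction parts with
  | nil => simp [pyLoopA]
  | cons p ps ih =>
    simp only [pyLoopA]
    by_cases h1 : p = "tests".toList ∨ p = "test".toList
    · rw [if_pos (by rcases h1 with h | h <;> simp [h])]
      simp only [true_iff]
      exact ⟨p, List.mem_cons_self, Or.imp_right Or.inl h1⟩
    · rw [if_neg (by
        simp only [Bool.or_eq_true, beq_iff_eq]
        rintro (h | h)
        exacts [h1 (Or.inl h), h1 (Or.inr h)])]
      by_cases h2 : PySem.Chars.startswith p "test_".toList = true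
      · rw [if_pos h2]
        simp only [true_iff]
        exact ⟨p, List.mem_cons_self, Or.inr (Or.inr ((PySem.Chars.startswith_iff _ _).mp h2))⟩
      · rw [if_neg (by simpa using h2)]
        rw [ih]
        constructor
        · rintro ⟨x, hx, hP⟩; exact ⟨x, List.mem_cons_of_mem _ hx, hP⟩
        · rintro ⟨x, hx, hP⟩
          rcases List.mem_cons.mp hx with rfl | hx'
          · exfalso
            rcases hP with h | h | h
            · exact h1 (Or.inl h)
            · exact h1 (Or.inr h)
            · exact h2 ((PySem.Chars.startswith_iff _ _).mpr h)
          · exact ⟨x, hx', hP⟩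

-- the last segment: everything after the final slash
theorem lastseg (s : List Char) (cur : List Char) (hc : '/' ∉ cur) :
    '/' ∉ (splitAux cur s).getLastD [] ∧
      (cur ++ s = (splitAux cur s).getLastD [] ∨
        ∃ pre, cur ++ s = pre ++ '/' :: (splitAux cur s).getLastD []) := by
  induction s generalizing cur with
  | nil => exact ⟨hc, Or.inl (by simp [splitAux])⟩
  | cons c r ih =>
    by_cases hcc : c = '/'
    · subst hcc
      rw [(by simp [splitAux] : splitAux cur ('/' :: r) = cur :: splitAux [] r)]
      have hne := splitAux_ne_nil [] r
      have hlast : (cur :: splitAux [] r).getLastD [] = (splitAux [] r).getLastD [] := by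
        cases hsp : splitAux [] r with
        | nil => exact absurd hsp hne
        | cons q qs => simp
      rw [hlast]
      obtain ⟨h1, h2⟩ := ih [] (by simp)
      refine ⟨h1, Or.inr ?_⟩
      simp only [List.nil_append] at h2
      rcases h2 with h2 | ⟨pre, h2⟩
      · refine ⟨cur, ?_⟩
        rw [← h2]
      · refine ⟨cur ++ '/' :: pre, ?_⟩
        conv_lhs => rw [h2]
        simp
    · rw [(by simp [splitAux, hcc] : splitAux cur (c :: r) = splitAux (cur ++ [c]) r)]
      have := ih (cur ++ [c]) (by
        intro hm
        rcases List.mem_append.mp hm with hm | hm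
        · exact hc hm
        · exact hcc (List.mem_singleton.mp hm).symm)
      simpa using this

theorem suff_slash (x l u : List Char) (hx : '/' ∉ x) (hl : '/' ∉ l) :
    ('/' :: x <:+ u ++ '/' :: l) ↔ x = l := by
  rw [← List.reverse_prefix]
  have e1 : ('/' :: x).reverse = x.reverse ++ '/' :: ([] : List Char) := by simp
  have e2 : (u ++ '/' :: l).reverse = l.reverse ++ '/' :: u.reverse := by simp
  rw [e1, e2, helper1 _ _ _ _ (by simpa using hx) (by simpa using hl)]
  constructor
  · rintro ⟨h, -⟩; exact List.reverse_injective h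
  · rintro rfl; exact ⟨rfl, List.nil_prefix⟩

theorem suff_noslash (y u l : List Char) (hy : '/' ∉ y) :
    (y <:+ u ++ '/' :: l) ↔ y <:+ l := by
  rw [← List.reverse_prefix, ← List.reverse_prefix (l₂ := l)]
  have e2 : (u ++ '/' :: l).reverse = l.reverse ++ '/' :: u.reverse := by simp
  rw [e2, pref_noslash _ _ _ (by simpa using hy)]

theorem getLastD_mem {α : Type} (l : List α) (d : α) (h : l ≠ []) : l.getLastD d ∈ l := by
  induction l generalizing d with
  | nil => exact absurd rfl h
  | cons a l ih =>
    rw [List.getLastD_cons]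
    cases l with
    | nil => simp
    | cons b l' => exact List.mem_cons_of_mem _ (ih a (by simp))

theorem pyGet_neg_one {α : Type} [Inhabited α] (l : List α) (h : l ≠ []) :
    PySem.List.pyGet? l (-1) = some (l.getLastD default) := by
  simp only [PySem.List.pyGet?, PySem.List.pyIdx?]
  have hl : 0 < l.length := List.length_pos_iff.mpr h
  rw [if_neg (by omega), if_pos (by omega)]
  simp only [Option.bind_some]
  norm_num
  have hg : l.getLast? = l[l.length - 1]? := List.getLast?_eq_getElem?
  have hne : l.getLast? ≠ none := by
    intro h0
    exact h (List.getLast?_eq_none_iff.mp h0)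
  obtain ⟨v, hv⟩ := Option.ne_none_iff_exists'.mp hne
  rw [← hg, hv]
  rfl

-- the "_test.py" suffix check may be done on the whole path or on its last segment alike
theorem ew_last_eq (s L : List Char) (hdec : s = L ∨ ∃ pre, s = pre ++ '/' :: L) :
    PySem.Chars.endswith s "_test.py".toList = PySem.Chars.endswith L "_test.py".toList := by
  rcases hdec with rfl | ⟨pre, rfl⟩
  · rfl
  · rw [Bool.eq_iff_iff, PySem.Chars.endswith_iff, PySem.Chars.endswith_iff]
    exact suff_noslash _ pre L (by decide)

-- a '/'-anchored suffix of '/'::s names exactly the last segment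
theorem anchored_suffix_eq (s L x : List Char) (hdec : s = L ∨ ∃ pre, s = pre ++ '/' :: L)
    (hLns : '/' ∉ L) (hx : '/' ∉ x) :
    PySem.Chars.endswith ('/' :: s) ('/' :: x) = (L == x) := by
  rw [Bool.eq_iff_iff, PySem.Chars.endswith_iff, beq_iff_eq]
  rcases hdec with rfl | ⟨pre, rfl⟩
  · have h := suff_slash x _ [] hx hLns
    simpa [eq_comm] using h
  · have harr : '/' :: (pre ++ '/' :: L) = ('/' :: pre) ++ '/' :: L := by simp
    rw [harr]
    have h := suff_slash x L ('/' :: pre) hx hLns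
    simpa [eq_comm] using h

-- ===== VERDICT (by name: the statement is the Claim_ definition above) =====
theorem is_test_path_py_spec : Claim_equal_is_test_path_py := by
  intro path _
  unfold Spec_is_test_path_py
  simp only [is_test_path_py, is_test_path_py_alt]
  generalize pyRstripSlash (PySem.Chars.lower (PySem.Chars.replace path.toList ['\\'] ['/'])) = s
  rw [splitOn_eq]
  have hparts : splitAux [] s ≠ [] := splitAux_ne_nil [] s
  -- the segment loop of A equals the three substring searches of B
  have h1 : PySem.Chars.isIn "/tests/".toList ('/' :: (s ++ ['/'])) = true ↔
      "tests".toList ∈ splitAux [] s := by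
    rw [PySem.Chars.isIn_iff_infix,
      (by decide : "/tests/".toList = '/' :: ("tests".toList ++ ['/']))]
    have h := seg_iff s [] "tests".toList (by simp) (by decide)
    simpa using h
  have h2 : PySem.Chars.isIn "/test/".toList ('/' :: (s ++ ['/'])) = true ↔
      "test".toList ∈ splitAux [] s := by
    rw [PySem.Chars.isIn_iff_infix,
      (by decide : "/test/".toList = '/' :: ("test".toList ++ ['/']))]
    have h := seg_iff s [] "test".toList (by simp) (by decide)
    simpa using h
  have h3 : PySem.Chars.isIn "/test_".toList ('/' :: (s ++ ['/'])) = true ↔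
      ∃ p ∈ splitAux [] s, "test_".toList <+: p := by
    rw [PySem.Chars.isIn_iff_infix,
      (by decide : "/test_".toList = '/' :: "test_".toList)]
    have h := segpre_iff s [] "test_".toList (by simp) (by decide)
    simpa using h
  have hdir : pyLoopA (splitAux [] s) =
      (PySem.Chars.isIn "/tests/".toList ('/' :: (s ++ ['/']))
        || PySem.Chars.isIn "/test/".toList ('/' :: (s ++ ['/']))
        || PySem.Chars.isIn "/test_".toList ('/' :: (s ++ ['/']))) := by
    rw [Bool.eq_iff_iff, loopA_iff]
    simp only [Bool.or_eq_true, h1, h2, h3]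
    constructor
    · rintro ⟨p, hp, rfl | rfl | hpre⟩
      · exact Or.inl (Or.inl hp)
      · exact Or.inl (Or.inr hp)
      · exact Or.inr ⟨p, hp, hpre⟩
    · rintro ((h | h) | ⟨p, hp, hpre⟩)
      · exact ⟨_, h, Or.inl rfl⟩
      · exact ⟨_, h, Or.inr (Or.inl rfl)⟩
      · exact ⟨p, hp, Or.inr (Or.inr hpre)⟩
  rw [hdir]
  cases hd : (PySem.Chars.isIn "/tests/".toList ('/' :: (s ++ ['/']))
      || PySem.Chars.isIn "/test/".toList ('/' :: (s ++ ['/']))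
      || PySem.Chars.isIn "/test_".toList ('/' :: (s ++ ['/']))) with
  | true => simp
  | false =>
    simp only [Bool.false_eq_true, if_false]
    have hni : (splitAux [] s).isEmpty = false := by
      cases hsp : splitAux [] s with
      | nil => exact absurd hsp hparts
      | cons q qs => rfl
    rw [hni]
    cases he : PySem.Chars.endswith path.toList ['/'] with
    | true => simp
    | false =>
      simp only [Bool.not_false, Bool.and_true, if_true]
      rw [pyGet_neg_one _ hparts]
      have hdd : (default : List Char) = [] := rfl
      simp only [Option.getD_some, hdd]
      obtain ⟨hLns, hdec⟩ := lastseg s [] (by simp)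
      simp only [List.nil_append] at hdec
      have hsw : PySem.Chars.startswith ((splitAux [] s).getLastD [])
          "test_".toList = false := by
        cases hb : PySem.Chars.startswith ((splitAux [] s).getLastD []) "test_".toList with
        | false => rfl
        | true =>
          exfalso
          have hmem := getLastD_mem (splitAux [] s) ([] : List Char) hparts
          have hloop : pyLoopA (splitAux [] s) = true :=
            (loopA_iff _).mpr ⟨_, hmem,
              Or.inr (Or.inr ((PySem.Chars.startswith_iff _ _).mp hb))⟩
          rw [hdir, hd] at hloop
          exact absurd hloop (by simp)
      rw [hsw, Bool.false_or]
      rw [ew_last_eq s _ hdec]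
      rw [(by decide : "/conftest.py".toList = '/' :: "conftest.py".toList),
        (by decide : "/testing.py".toList = '/' :: "testing.py".toList)]
      rw [anchored_suffix_eq s _ "conftest.py".toList hdec hLns (by decide),
        anchored_suffix_eq s _ "testing.py".toList hdec hLns (by decide)]
      cases PySem.Chars.endswith ((splitAux [] s).getLastD []) "_test.py".toList <;>
        cases ((splitAux [] s).getLastD []) == "conftest.py".toList <;>
        cases ((splitAux [] s).getLastD []) == "testing.py".toList <;> rfl
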